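-- pv_equiv track=rewrite | github.com/pypi-data/pypi-mirror-371 | packages/Terminal-Speil-B1/Terminal_Speil_B1-1.1.1-py3-none-any.whl/utils.py | calculate_battle_power
-- ===== SOURCE A (Python) =====
-- def calculate_battle_power(cart, completed_quests, days_passed):
--     """Calculate total battle effectiveness"""
--     power = 0
--
--     # Ally power
--     ally_power = {
--         'brian': 2, 'black knight': 3, 'grim reaper': 5, 'god': 6,
--         'mage': 4, 'nordic': 3, 'biccus diccus': 4, 'raddragonore': 5
--     }
--
--     for ally in ally_power:
--         if ally in cart:
--             power += ally_power[ally]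
--
--     # Equipment power
--     equipment_power = {
--         'spear': 1, 'axe': 2, 'scythe': 3, 'catapult': 2,
--         'body armor': 2, 'dragon': 4, 'wolf': 1
--     }
--
--     for equipment in equipment_power:
--         if equipment in cart:
--             power += equipment_power[equipment]
--
--     # Quest bonus (preparation matters)
--     power += len(completed_quests) // 3
--
--     # Time bonus/penalty
--     if days_passed < 5:
--         power += 1  # Well prepared
--     elif days_passed > 8:
--         power -= 1  # Rushed
--
--     return power
-- ===== SOURCE B (Python) =====
-- def _score(item):
--     if item == 'brian': return 2
--     elif item == 'black knight': return 3
--     elif item == 'grim reaper': return 5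
--     elif item == 'god': return 6
--     elif item == 'mage': return 4
--     elif item == 'nordic': return 3
--     elif item == 'biccus diccus': return 4
--     elif item == 'raddragonore': return 5
--     elif item == 'spear': return 1
--     elif item == 'axe': return 2
--     elif item == 'scythe': return 3
--     elif item == 'catapult': return 2
--     elif item == 'body armor': return 2
--     elif item == 'dragon': return 4
--     elif item == 'wolf': return 1
--     return 0
--
-- def calculate_battle_power(cart, completed_quests, days_passed):
--     """Calculate total battle effectiveness"""
--     power = 0
--     seen = set()
--     for item in cart:
--         if item not in seen:
--             seen.add(item)
--             power += _score(item)
--     power += len(completed_quests) // 3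
--     time_bonus = 1 if days_passed < 5 else (-1 if days_passed > 8 else 0)
--     return power + time_bonus
-- ===== Notes on version B (the rewrite author's own statement) =====
-- stated objective: alternative
-- what changed: B inverts the traversal: instead of scanning every key of two fixed dictionaries and testing membership in cart, it walks cart once with a seen-set, scoring each distinct item via a scoring function, and computes the time bonus as an expression rather than by branching on the accumulator.
import Mathlib
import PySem

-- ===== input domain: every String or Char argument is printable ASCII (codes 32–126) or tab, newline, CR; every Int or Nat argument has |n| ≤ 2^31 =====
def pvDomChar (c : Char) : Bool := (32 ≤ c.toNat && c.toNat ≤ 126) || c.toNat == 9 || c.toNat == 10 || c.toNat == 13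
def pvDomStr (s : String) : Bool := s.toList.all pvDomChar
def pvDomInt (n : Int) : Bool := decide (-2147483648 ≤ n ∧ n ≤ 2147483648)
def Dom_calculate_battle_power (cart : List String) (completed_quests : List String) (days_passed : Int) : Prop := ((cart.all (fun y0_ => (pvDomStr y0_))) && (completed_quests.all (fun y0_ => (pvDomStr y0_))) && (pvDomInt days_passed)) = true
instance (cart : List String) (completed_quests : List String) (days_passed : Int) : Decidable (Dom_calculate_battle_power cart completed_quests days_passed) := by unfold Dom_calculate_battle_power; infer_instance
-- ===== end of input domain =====

-- B walks cart once with a seen-set, scoring each distinct item, instead of scanning the two fixed dictionaries and testing membership in cart; alternative traversal, no speed claim.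

-- ===== PORT A =====
-- the Python dict literals have distinct keys; iterating the dict = iterating its (key, value)
-- pairs in insertion order, and ally_power[ally] is that pair's value — exact here
def allyPower : List (String × Int) :=
  [("brian", 2), ("black knight", 3), ("grim reaper", 5), ("god", 6),
   ("mage", 4), ("nordic", 3), ("biccus diccus", 4), ("raddragonore", 5)]

def equipmentPower : List (String × Int) :=
  [("spear", 1), ("axe", 2), ("scythe", 3), ("catapult", 2),
   ("body armor", 2), ("dragon", 4), ("wolf", 1)]

def calculate_battle_power (cart : List String) (completed_quests : List String) (days_passed : Int) : Int :=
  let power : Int := 0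
  let power := allyPower.foldl (fun p kv => if kv.1 ∈ cart then p + kv.2 else p) power
  let power := equipmentPower.foldl (fun p kv => if kv.1 ∈ cart then p + kv.2 else p) power
  let power := power + PySem.Int.floordiv (completed_quests.length : Int) 3
  if days_passed < 5 then power + 1
  else if days_passed > 8 then power - 1
  else power

-- ===== PORT B =====
-- _score: the if/elif chain of Source B, literally
def pvScore (item : String) : Int :=
  if item = "brian" then 2
  else if item = "black knight" then 3
  else if item = "grim reaper" then 5
  else if item = "god" then 6
  else if item = "mage" then 4
  else if item = "nordic" then 3
  else if item = "biccus diccus" then 4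
  else if item = "raddragonore" then 5
  else if item = "spear" then 1
  else if item = "axe" then 2
  else if item = "scythe" then 3
  else if item = "catapult" then 2
  else if item = "body armor" then 2
  else if item = "dragon" then 4
  else if item = "wolf" then 1
  else 0

-- the for-loop over cart carrying (power, seen); result does not depend on the set's order
def calculate_battle_power_alt (cart : List String) (completed_quests : List String) (days_passed : Int) : Int :=
  let st : Int × PySem.Set String :=
    cart.foldl
      (fun st item =>
        if item ∈ st.2 then st else (st.1 + pvScore item, PySem.Set.add st.2 item))
      (0, PySem.Set.empty)
  let power := st.1 + PySem.Int.floordiv (completed_quests.length : Int) 3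
  let time_bonus : Int := if days_passed < 5 then 1 else if days_passed > 8 then -1 else 0
  power + time_bonus

-- ===== PRECONDITION & SPEC =====
def Spec_calculate_battle_power (cart : List String) (completed_quests : List String) (days_passed : Int) (out : Int) : Prop := out = calculate_battle_power_alt cart completed_quests days_passed
instance (cart : List String) (completed_quests : List String) (days_passed : Int) (out : Int) : Decidable (Spec_calculate_battle_power cart completed_quests days_passed out) := by unfold Spec_calculate_battle_power; infer_instance

-- ===== CLAIM (what is proved, stated in full; the proofs are below) =====
def Claim_equal_calculate_battle_power : Prop := ∀ (cart : List String) (completed_quests : List String) (days_passed : Int), Dom_calculate_battle_power cart completed_quests days_passed → Spec_calculate_battle_power cart completed_quests days_passed (calculate_battle_power cart completed_quests days_passed)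

-- ===== LEMMAS AND PROOFS =====

-- fold of a predicate-gated sum over a (key, value) list
def foldS (kvs : List (String × Int)) (P : String → Prop) [DecidablePred P] (init : Int) : Int :=
  kvs.foldl (fun p kv => if P kv.1 then p + kv.2 else p) init

-- first-match lookup with default 0 (comparison oriented as in pvScore)
def assocD : List (String × Int) → String → Int
  | [], _ => 0
  | (k, v) :: rest, x => if x = k then v else assocD rest x

theorem foldS_cons (k : String) (v : Int) (rest : List (String × Int)) (P : String → Prop)
    [DecidablePred P] (init : Int) :
    foldS ((k, v) :: rest) P init = foldS rest P (if P k then init + v else init) := by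
  by_cases h : P k <;> simp [foldS, h]

theorem foldS_shift (kvs : List (String × Int)) (P : String → Prop) [DecidablePred P] (init : Int) :
    foldS kvs P init = init + foldS kvs P 0 := by
  induction kvs generalizing init with
  | nil => simp [foldS]
  | cons kv rest ih =>
    obtain ⟨k, v⟩ := kv
    rw [foldS_cons, foldS_cons]
    by_cases h : P k
    · rw [if_pos h, if_pos h, ih (init + v), ih (0 + v)]; ring
    · rw [if_neg h, if_neg h]; exact ih init

theorem foldS_congr (kvs : List (String × Int)) (P Q : String → Prop) [DecidablePred P] [DecidablePred Q]
    (init : Int) (h : ∀ kv ∈ kvs, P kv.1 ↔ Q kv.1) :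
    foldS kvs P init = foldS kvs Q init := by
  induction kvs generalizing init with
  | nil => rfl
  | cons kv rest ih =>
    obtain ⟨k, v⟩ := kv
    rw [foldS_cons, foldS_cons]
    have hk : P k ↔ Q k := h (k, v) (by simp)
    have hrest : ∀ kv' ∈ rest, P kv'.1 ↔ Q kv'.1 := fun kv' hm => h kv' (by simp [hm])
    by_cases hp : P k
    · rw [if_pos hp, if_pos (hk.mp hp)]; exact ih _ hrest
    · rw [if_neg hp, if_neg (fun hq => hp (hk.mpr hq))]; exact ih _ hrest

theorem foldS_false (kvs : List (String × Int)) (P : String → Prop) [DecidablePred P] (init : Int)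
    (h : ∀ kv ∈ kvs, ¬ P kv.1) : foldS kvs P init = init := by
  induction kvs generalizing init with
  | nil => rfl
  | cons kv rest ih =>
    obtain ⟨k, v⟩ := kv
    rw [foldS_cons, if_neg (h (k, v) (by simp))]
    exact ih _ (fun kv' hm => h kv' (by simp [hm]))

-- splitting off one key h on which P holds and Q does not, P = Q elsewhere
theorem foldS_split (kvs : List (String × Int)) (P Q : String → Prop) [DecidablePred P] [DecidablePred Q]
    (h : String) (hnd : (kvs.map Prod.fst).Nodup)
    (hP : P h) (hQ : ¬ Q h) (hpq : ∀ x, x ≠ h → (P x ↔ Q x)) :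
    foldS kvs P 0 = assocD kvs h + foldS kvs Q 0 := by
  induction kvs with
  | nil => simp [foldS, assocD]
  | cons kv rest ih =>
    obtain ⟨k, v⟩ := kv
    simp only [List.map_cons, List.nodup_cons] at hnd
    by_cases hk : k = h
    · subst hk
      have hrest : ∀ kv' ∈ rest, P kv'.1 ↔ Q kv'.1 := fun kv' hm =>
        hpq _ (fun he => hnd.1 (he ▸ List.mem_map_of_mem hm))
      have ha : assocD ((k, v) :: rest) k = v := by simp [assocD]
      rw [foldS_cons, foldS_cons, if_pos hP, if_neg hQ, ha,
        foldS_shift rest P (0 + v), foldS_congr rest P Q 0 hrest]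
      ring
    · have ha : assocD ((k, v) :: rest) h = assocD rest h := by
        simp only [assocD, if_neg (show ¬ h = k from fun he => hk he.symm)]
      rw [foldS_cons, foldS_cons, ha]
      by_cases hp : P k
      · rw [if_pos hp, if_pos ((hpq k hk).mp hp),
          foldS_shift rest P (0 + v), foldS_shift rest Q (0 + v), ih hnd.2]
        ring
      · rw [if_neg hp, if_neg (fun hq => hp ((hpq k hk).mpr hq))]
        exact ih hnd.2

def tableKV : List (String × Int) := allyPower ++ equipmentPower

theorem pvScore_eq_assocD (x : String) : pvScore x = assocD tableKV x := by
  simp [pvScore, assocD, tableKV, allyPower, equipmentPower]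

-- proof-side recursion describing what the loop adds to power from state seen
def pvGo : List String → PySem.Set String → Int
  | [], _ => 0
  | h :: t, seen => if h ∈ seen then pvGo t seen else pvScore h + pvGo t (PySem.Set.add seen h)

theorem foldl_fst_eq_pvGo (l : List String) (p : Int) (seen : PySem.Set String) :
    (l.foldl
      (fun st item =>
        if item ∈ st.2 then st else (st.1 + pvScore item, PySem.Set.add st.2 item))
      (p, seen)).1 = p + pvGo l seen := by
  induction l generalizing p seen with
  | nil => simp [pvGo]
  | cons h t ih =>
    simp only [List.foldl_cons, pvGo]
    by_cases hm : h ∈ seen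
    · simp [hm, ih]
    · simp only [hm, ite_false, ih]
      ring

theorem pvGo_eq_foldS (l : List String) (seen : PySem.Set String) :
    pvGo l seen = foldS tableKV (fun x => x ∈ l ∧ x ∉ seen) 0 := by
  induction l generalizing seen with
  | nil => rw [foldS_false] <;> simp [pvGo]
  | cons h t ih =>
    simp only [pvGo]
    by_cases hm : h ∈ seen
    · rw [if_pos hm, ih]
      refine foldS_congr _ _ _ _ (fun kv _ => ?_)
      constructor
      · rintro ⟨hmem, hns⟩
        exact ⟨List.mem_cons_of_mem _ hmem, hns⟩
      · rintro ⟨hmem, hns⟩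
        rcases List.mem_cons.mp hmem with h1 | h1
        · exact absurd (h1 ▸ hm) hns
        · exact ⟨h1, hns⟩
    · rw [if_neg hm, ih,
        foldS_split tableKV (fun x => x ∈ h :: t ∧ x ∉ seen)
          (fun x => x ∈ t ∧ x ∉ PySem.Set.add seen h) h (by decide)
          ⟨List.mem_cons_self .., hm⟩
          (fun hc => hc.2 (by simp [PySem.Set.mem_add]))
          (fun x hx => by
            simp only [List.mem_cons, PySem.Set.mem_add, not_or]
            constructor
            · rintro ⟨hmem, hns⟩
              rcases hmem with h1 | h1
              · exact absurd h1 hx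
              · exact ⟨h1, hns, hx⟩
            · rintro ⟨hmem, hns, _⟩
              exact ⟨Or.inr hmem, hns⟩),
        pvScore_eq_assocD]

-- ===== VERDICT (by name: the statement is the Claim_ definition above) =====
theorem calculate_battle_power_spec : Claim_equal_calculate_battle_power := by
  intro cart completed_quests days_passed _
  unfold Spec_calculate_battle_power calculate_battle_power calculate_battle_power_alt
  have hA :
      equipmentPower.foldl (fun p kv => if kv.1 ∈ cart then p + kv.2 else p)
        (allyPower.foldl (fun p kv => if kv.1 ∈ cart then p + kv.2 else p) 0)
        = foldS tableKV (fun x => x ∈ cart) 0 := by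
    rw [foldS, tableKV, List.foldl_append]
  have hB :
      (cart.foldl
        (fun st item =>
          if item ∈ st.2 then st else (st.1 + pvScore item, PySem.Set.add st.2 item))
        ((0 : Int), PySem.Set.empty)).1
        = foldS tableKV (fun x => x ∈ cart) 0 := by
    rw [foldl_fst_eq_pvGo, pvGo_eq_foldS]
    have : foldS tableKV (fun x => x ∈ cart ∧ x ∉ (PySem.Set.empty : PySem.Set String)) 0
        = foldS tableKV (fun x => x ∈ cart) 0 := by
      refine foldS_congr _ _ _ _ (fun kv _ => ?_)
      simp [PySem.Set.empty]
    rw [this]; ring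
  simp only [hA, hB]
  split_ifs <;> ring
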